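-- pv_equiv track=rewrite | github.com/kron777/Nex_v4.0 | nex/nex_phi_proxy.py | _recurrence_depth
-- ===== SOURCE A (Python) =====
-- def _recurrence_depth(node_id: str, graph: dict, max_depth: int) -> int:
--     """
--     How many steps from node_id can we follow edges and return to node_id.
--     Bounded BFS — returns depth of shortest cycle found.
--     """
--     if node_id not in graph:
--         return 0
--
--     visited = {node_id}
--     frontier = [(node_id, 0)]
--     while frontier:
--         current, depth = frontier.pop(0)
--         if depth >= max_depth:
--             continue
--         node = graph.get(current, {})
--         neighbors = (
--             node.get("supports", []) +
--             node.get("explains", []) +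
--             node.get("contradicts", [])
--         )
--         for nb in neighbors:
--             if nb == node_id and depth > 0:
--                 return depth + 1  # found cycle
--             if nb not in visited:
--                 visited.add(nb)
--                 frontier.append((nb, depth + 1))
--     return 0
-- ===== SOURCE B (Python) =====
-- def _recurrence_depth(node_id: str, graph: dict, max_depth: int) -> int:
--     """Bounded BFS in two phases: fill a distance table, then scan it for a
--     predecessor of node_id (no early exit interleaved with the traversal)."""
--     if node_id not in graph:
--         return 0
--
--     def nbrs(u):
--         node = graph.get(u, {})
--         return (node.get("supports", []) +
--                 node.get("explains", []) +
--                 node.get("contradicts", []))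
--
--     # Phase 1: bounded BFS distance table (insertion order = discovery order).
--     dist = {node_id: 0}
--     order = [node_id]
--     i = 0
--     while i < len(order):
--         u = order[i]
--         i += 1
--         d = dist[u]
--         if d < max_depth:
--             for nb in nbrs(u):
--                 if nb not in dist:
--                     dist[nb] = d + 1
--                     order.append(nb)
--
--     # Phase 2: first discovered node (other than node_id) that points back.
--     for u, d in dist.items():
--         if u != node_id and d < max_depth and node_id in nbrs(u):
--             return d + 1
--     return 0
-- ===== Notes on version B (the rewrite author's own statement) =====
-- stated objective: alternative
-- what changed: A interleaves the cycle check into a single early-exit BFS over a (node, depth) queue with a separate visited set; B first runs a plain bounded BFS that fills a distance table (the dict also serving as the visited set, with a name-only queue), then scans the finished table for the first node other than node_id whose neighbours contain node_id.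
import Mathlib
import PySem

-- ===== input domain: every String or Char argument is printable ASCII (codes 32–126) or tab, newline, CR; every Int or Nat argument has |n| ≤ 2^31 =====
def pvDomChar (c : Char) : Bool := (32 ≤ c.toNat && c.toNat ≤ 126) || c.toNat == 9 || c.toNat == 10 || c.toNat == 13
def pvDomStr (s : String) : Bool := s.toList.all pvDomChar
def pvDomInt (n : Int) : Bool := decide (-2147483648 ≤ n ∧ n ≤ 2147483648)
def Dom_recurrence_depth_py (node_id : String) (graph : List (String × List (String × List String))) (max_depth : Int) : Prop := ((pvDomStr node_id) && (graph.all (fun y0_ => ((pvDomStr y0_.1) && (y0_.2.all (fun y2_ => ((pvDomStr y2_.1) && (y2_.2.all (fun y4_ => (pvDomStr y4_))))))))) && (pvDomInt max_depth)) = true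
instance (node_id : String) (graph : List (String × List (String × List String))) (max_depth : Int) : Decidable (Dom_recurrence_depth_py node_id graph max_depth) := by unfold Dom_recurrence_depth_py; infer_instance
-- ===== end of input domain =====

-- B replaces A's single interleaved early-exit BFS by two phases — fill a distance table by a
-- plain bounded BFS, then scan the table for a predecessor of node_id (objective: alternative
-- decomposition, same cost class). Equivalence is proved for the RETURN value; neither version
-- mutates its arguments.

-- shared subexpression of both Pythons: supports ++ explains ++ contradicts of graph.get(u, {})
def pvNbrs (graph : List (String × List (String × List String))) (u : String) : List String :=
  let node := (PySem.Dict.mk graph).getD u []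
  (PySem.Dict.mk node).getD "supports" [] ++ (PySem.Dict.mk node).getD "explains" []
    ++ (PySem.Dict.mk node).getD "contradicts" []

-- fuel for the while-loops: each iteration pops one element, and at most
-- 1 + (total number of neighbour entries in graph) elements are ever enqueued,
-- so this fuel is never exhausted (a pure totality guard, not part of the algorithm).
def pvFuel (graph : List (String × List (String × List String))) : Nat :=
  2 + (graph.flatMap (fun p => p.2.flatMap (fun q => q.2))).length

-- ===== PORT A =====
mutual
-- the while-loop of A: frontier of (node, depth) pairs plus a visited set, early return on a cycle
def aLoop (node_id : String) (graph : List (String × List (String × List String)))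
    (max_depth : Int) : Nat → List (String × Int) → PySem.Set String → Int
  | 0, _, _ => 0
  | _ + 1, [], _ => 0
  | f + 1, (current, depth) :: rest, visited =>
    if max_depth ≤ depth then aLoop node_id graph max_depth f rest visited
    else aInner node_id graph max_depth f depth (pvNbrs graph current) rest visited
termination_by f _ _ => (f, 0)
-- the inner 'for nb in neighbors' loop of A
def aInner (node_id : String) (graph : List (String × List (String × List String)))
    (max_depth : Int) : Nat → Int → List String → List (String × Int) → PySem.Set String → Int
  | f, _, [], frontier, visited => aLoop node_id graph max_depth f frontier visited
  | f, depth, nb :: t, frontier, visited =>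
    if nb = node_id ∧ 0 < depth then depth + 1
    else if visited.contains nb then aInner node_id graph max_depth f depth t frontier visited
    else aInner node_id graph max_depth f depth t (frontier ++ [(nb, depth + 1)]) (visited.add nb)
termination_by f _ nbs _ _ => (f, nbs.length + 1)
end

def recurrence_depth_py (node_id : String) (graph : List (String × List (String × List String))) (max_depth : Int) : Int :=
  if ¬ (PySem.Dict.mk graph).contains node_id then 0
  else aLoop node_id graph max_depth (pvFuel graph) [(node_id, 0)] (PySem.Set.add PySem.Set.empty node_id)

-- ===== PORT B =====
-- phase 1 of B: bounded BFS filling the distance table (the dict doubles as the visited set)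
def bLoop (graph : List (String × List (String × List String)))
    (max_depth : Int) : Nat → List String → PySem.Dict String Int → PySem.Dict String Int
  | 0, _, dist => dist
  | _ + 1, [], dist => dist
  | f + 1, u :: rest, dist =>
    let d := dist.getD u 0
    if d < max_depth then
      let s := (pvNbrs graph u).foldl
        (fun (p : PySem.Dict String Int × List String) nb =>
          if p.1.contains nb then p else (p.1.insert nb (d + 1), p.2 ++ [nb]))
        (dist, [])
      bLoop graph max_depth f (rest ++ s.2) s.1
    else bLoop graph max_depth f rest dist

-- phase 2 of B: scan dist.items() for the first node (other than node_id) pointing back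
def bScan (node_id : String) (graph : List (String × List (String × List String)))
    (max_depth : Int) : List (String × Int) → Int
  | [] => 0
  | (u, d) :: t =>
    if u ≠ node_id ∧ d < max_depth ∧ node_id ∈ pvNbrs graph u then d + 1
    else bScan node_id graph max_depth t

def recurrence_depth_py_alt (node_id : String) (graph : List (String × List (String × List String))) (max_depth : Int) : Int :=
  if ¬ (PySem.Dict.mk graph).contains node_id then 0
  else bScan node_id graph max_depth
    (bLoop graph max_depth (pvFuel graph) [node_id] (PySem.Dict.empty.insert node_id 0)).items

-- ===== PRECONDITION & SPEC =====
def Spec_recurrence_depth_py (node_id : String) (graph : List (String × List (String × List String))) (max_depth : Int) (out : Int) : Prop := out = recurrence_depth_py_alt node_id graph max_depth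
instance (node_id : String) (graph : List (String × List (String × List String))) (max_depth : Int) (out : Int) : Decidable (Spec_recurrence_depth_py node_id graph max_depth out) := by unfold Spec_recurrence_depth_py; infer_instance

-- ===== CLAIM (what is proved, stated in full; the proofs are below) =====
def Claim_equal_recurrence_depth_py : Prop := ∀ (node_id : String) (graph : List (String × List (String × List String))) (max_depth : Int), Dom_recurrence_depth_py node_id graph max_depth → Spec_recurrence_depth_py node_id graph max_depth (recurrence_depth_py node_id graph max_depth)

-- ===== LEMMAS AND PROOFS =====

-- a table entry that would make B's scan return: u ≠ node_id, depth in range, u points back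
def pvCand (node_id : String) (graph : List (String × List (String × List String)))
    (max_depth : Int) (p : String × Int) : Prop :=
  p.1 ≠ node_id ∧ p.2 < max_depth ∧ node_id ∈ pvNbrs graph p.1

-- first occurrences of elements of the second list that are not in the first ("newly discovered")
def pvFresh (seen : List String) : List String → List String
  | [] => []
  | nb :: t => if nb ∈ seen then pvFresh seen t else nb :: pvFresh (seen ++ [nb]) t

def pvAllN (graph : List (String × List (String × List String))) : List String :=
  graph.flatMap (fun p => p.2.flatMap (fun q => q.2))

lemma bScan_eq_zero (node_id : String) (graph : List (String × List (String × List String)))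
    (max_depth : Int) (l : List (String × Int))
    (h : ∀ p ∈ l, ¬ pvCand node_id graph max_depth p) :
    bScan node_id graph max_depth l = 0 := by
  induction l with
  | nil => rfl
  | cons p t ih =>
    obtain ⟨u, d⟩ := p
    rw [bScan, if_neg (by simpa [pvCand] using h (u, d) (List.mem_cons_self ..))]
    exact ih fun p hp => h p (List.mem_cons_of_mem _ hp)

lemma bScan_append (node_id : String) (graph : List (String × List (String × List String)))
    (max_depth : Int) (l1 l2 : List (String × Int)) (u : String) (d : Int)
    (h1 : ∀ p ∈ l1, ¬ pvCand node_id graph max_depth p)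
    (h2 : pvCand node_id graph max_depth (u, d)) :
    bScan node_id graph max_depth (l1 ++ (u, d) :: l2) = d + 1 := by
  induction l1 with
  | nil => rw [List.nil_append, bScan, if_pos (by simpa [pvCand] using h2)]
  | cons p t ih =>
    obtain ⟨u', d'⟩ := p
    rw [List.cons_append, bScan,
      if_neg (by simpa [pvCand] using h1 (u', d') (List.mem_cons_self ..))]
    exact ih fun p hp => h1 p (List.mem_cons_of_mem _ hp)

lemma bLoop_items_prefix (graph : List (String × List (String × List String))) (max_depth : Int) :
    ∀ (fuel : Nat) (q : List String) (dist : PySem.Dict String Int),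
    ∃ ext, (bLoop graph max_depth fuel q dist).items = dist.items ++ ext := by
  have hfold : ∀ (nbs : List String) (d : Int) (dist : PySem.Dict String Int) (acc : List String),
      ∃ e, (nbs.foldl (fun (p : PySem.Dict String Int × List String) nb =>
        if p.1.contains nb then p else (p.1.insert nb (d + 1), p.2 ++ [nb])) (dist, acc)).1.items
          = dist.items ++ e := by
    intro nbs d
    induction nbs with
    | nil => intro dist acc; exact ⟨[], by simp⟩
    | cons nb t ih =>
      intro dist acc
      simp only [List.foldl_cons]
      by_cases hc : dist.contains nb = true
      · rw [if_pos hc]; exact ih dist acc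
      · rw [if_neg hc]
        obtain ⟨e, he⟩ := ih (dist.insert nb (d + 1)) (acc ++ [nb])
        exact ⟨(nb, d + 1) :: e, by
          rw [he, PySem.Dict.items_insert_of_not_contains dist _ (by simpa using hc)]; simp⟩
  intro fuel
  induction fuel with
  | zero => intro q dist; exact ⟨[], by simp [bLoop]⟩
  | succ f ih =>
    intro q dist
    match q with
    | [] => exact ⟨[], by simp [bLoop]⟩
    | u :: rest =>
      rw [bLoop]
      by_cases hm : dist.getD u 0 < max_depth
      · rw [if_pos hm]
        obtain ⟨e1, he1⟩ := hfold (pvNbrs graph u) (dist.getD u 0) dist []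
        obtain ⟨e2, he2⟩ := ih _ ((pvNbrs graph u).foldl (fun (p : PySem.Dict String Int × List String) nb =>
          if p.1.contains nb then p else (p.1.insert nb (dist.getD u 0 + 1), p.2 ++ [nb])) (dist, [])).1
        exact ⟨e1 ++ e2, by rw [he2, he1, List.append_assoc]⟩
      · rw [if_neg hm]; exact ih rest dist

lemma pvFresh_mem : ∀ (t seen : List String) (x : String), x ∈ pvFresh seen t → x ∉ seen ∧ x ∈ t := by
  intro t
  induction t with
  | nil => simp [pvFresh]
  | cons nb t ih =>
    intro seen x hx
    rw [pvFresh] at hx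
    by_cases hm : nb ∈ seen
    · rw [if_pos hm] at hx
      exact ⟨(ih seen x hx).1, List.mem_cons_of_mem _ (ih seen x hx).2⟩
    · rw [if_neg hm] at hx
      rcases List.mem_cons.mp hx with h | h
      · exact ⟨h ▸ hm, h ▸ List.mem_cons_self ..⟩
      · have := ih (seen ++ [nb]) x h
        simp only [List.mem_append, List.mem_singleton, not_or] at this
        exact ⟨this.1.1, List.mem_cons_of_mem _ this.2⟩

lemma pvFresh_nodup : ∀ (t seen : List String), (pvFresh seen t).Nodup := by
  intro t
  induction t with
  | nil => simp [pvFresh]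
  | cons nb t ih =>
    intro seen
    rw [pvFresh]
    by_cases hm : nb ∈ seen
    · rw [if_pos hm]; exact ih seen
    · rw [if_neg hm]
      refine List.Nodup.cons (fun hc => ?_) (ih (seen ++ [nb]))
      have := (pvFresh_mem t (seen ++ [nb]) nb hc).1
      simp at this

lemma bFold_eq (d : Int) :
    ∀ (nbs : List String) (dist : PySem.Dict String Int) (acc : List String),
    dist.keys.Nodup →
    (nbs.foldl (fun (p : PySem.Dict String Int × List String) nb =>
        if p.1.contains nb then p else (p.1.insert nb (d + 1), p.2 ++ [nb])) (dist, acc)).2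
      = acc ++ pvFresh dist.keys nbs ∧
    (nbs.foldl (fun (p : PySem.Dict String Int × List String) nb =>
        if p.1.contains nb then p else (p.1.insert nb (d + 1), p.2 ++ [nb])) (dist, acc)).1.items
      = dist.items ++ (pvFresh dist.keys nbs).map (fun x => (x, d + 1)) := by
  intro nbs
  induction nbs with
  | nil => intro dist acc _; simp [pvFresh]
  | cons nb t ih =>
    intro dist acc hnd
    simp only [List.foldl_cons]
    by_cases hc : dist.contains nb = true
    · have hm : nb ∈ dist.keys := (PySem.Dict.contains_iff_mem_keys ..).mp hc
      rw [if_pos hc, pvFresh, if_pos hm]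
      exact ih dist acc hnd
    · have hm : nb ∉ dist.keys := fun h =>
        hc ((PySem.Dict.contains_iff_mem_keys ..).mpr h)
      rw [if_neg hc, pvFresh, if_neg hm]
      have hk : (dist.insert nb (d + 1)).keys = dist.keys ++ [nb] :=
        PySem.Dict.keys_insert_of_not_contains dist _ (by simpa using hc)
      have := ih (dist.insert nb (d + 1)) (acc ++ [nb])
        (PySem.Dict.nodup_keys_insert dist nb (d + 1) hnd)
      rw [hk] at this
      refine ⟨by rw [this.1]; simp, ?_⟩
      rw [this.2, PySem.Dict.items_insert_of_not_contains dist _ (by simpa using hc)]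
      simp

lemma aInner_no_exit (node_id : String) (graph : List (String × List (String × List String)))
    (max_depth : Int) (f : Nat) (depth : Int) :
    ∀ (nbs : List String) (frontier : List (String × Int)) (visited : List String),
    (∀ nb ∈ nbs, ¬ (nb = node_id ∧ 0 < depth)) →
    aInner node_id graph max_depth f depth nbs frontier visited
      = aLoop node_id graph max_depth f
          (frontier ++ (pvFresh visited nbs).map (fun x => (x, depth + 1)))
          (visited ++ pvFresh visited nbs) := by
  intro nbs
  induction nbs with
  | nil => intro frontier visited _; simp [pvFresh, aInner]
  | cons nb t ih =>
    intro frontier visited h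
    rw [aInner, if_neg (h nb (List.mem_cons_self ..))]
    by_cases hm : nb ∈ visited
    · have hc : PySem.Set.contains visited nb = true := by
        simp [PySem.Set.contains_eq_listContains, hm]
      rw [if_pos hc, pvFresh, if_pos hm]
      exact ih frontier visited fun x hx => h x (List.mem_cons_of_mem _ hx)
    · have hc : ¬ PySem.Set.contains visited nb = true := by
        simp [PySem.Set.contains_eq_listContains, hm]
      rw [if_neg hc, pvFresh, if_neg hm, PySem.Set.add_of_not_mem hm]
      rw [ih (frontier ++ [(nb, depth + 1)]) (visited ++ [nb])
        fun x hx => h x (List.mem_cons_of_mem _ hx)]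
      simp

lemma aInner_exit (node_id : String) (graph : List (String × List (String × List String)))
    (max_depth : Int) (f : Nat) (depth : Int) (hd : 0 < depth) :
    ∀ (nbs : List String) (frontier : List (String × Int)) (visited : List String),
    node_id ∈ nbs →
    aInner node_id graph max_depth f depth nbs frontier visited = depth + 1 := by
  intro nbs
  induction nbs with
  | nil => simp
  | cons nb t ih =>
    intro frontier visited hmem
    rw [aInner]
    by_cases he : nb = node_id ∧ 0 < depth
    · rw [if_pos he]
    · rw [if_neg he]
      have hm : node_id ∈ t := by
        rcases List.mem_cons.mp hmem with h | h
        · exact absurd ⟨h.symm, hd⟩ he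
        · exact h
      split <;> exact ih _ _ hm

lemma pvCount (U : List String) :
    ∀ (new keys : List String), new.Nodup → (∀ x ∈ new, x ∈ U ∧ x ∉ keys) →
    (U.filter (fun x => decide (x ∉ keys ++ new))).length + new.length
      ≤ (U.filter (fun x => decide (x ∉ keys))).length := by
  intro new
  induction new with
  | nil => intro keys _ _; simp
  | cons nb t ih =>
    intro keys hnd h
    have hne : nb ∉ t := (List.nodup_cons.mp hnd).1
    have step : (U.filter (fun x => decide (x ∉ keys ++ [nb]))).length + 1
        ≤ (U.filter (fun x => decide (x ∉ keys))).length := by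
      have hpred : U.filter (fun x => decide (x ∉ keys ++ [nb]))
          = (U.filter (fun x => decide (x ∉ keys))).filter (fun x => decide (x ≠ nb)) := by
        rw [List.filter_filter]
        exact List.filter_congr fun x _ => by
          by_cases h1 : x ∈ keys <;> by_cases h2 : x = nb <;> simp [h1, h2]
      have hmem : nb ∈ U.filter (fun x => decide (x ∉ keys)) := by
        have := h nb (List.mem_cons_self ..)
        simp only [List.mem_filter]
        exact ⟨this.1, by simpa using this.2⟩
      have hlt := (List.length_filter_lt_length_iff_exists
        (l := U.filter (fun x => decide (x ∉ keys)))
        (p := fun x => decide (x ≠ nb))).mpr ⟨nb, hmem, by simp⟩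
      rw [hpred]
      omega
    have hih := ih (keys ++ [nb]) (List.nodup_cons.mp hnd).2 (fun x hx =>
      ⟨(h x (List.mem_cons_of_mem _ hx)).1, by
        simp only [List.mem_append, List.mem_singleton, not_or]
        exact ⟨(h x (List.mem_cons_of_mem _ hx)).2, fun he => hne (he ▸ hx)⟩⟩)
    rw [show keys ++ nb :: t = (keys ++ [nb]) ++ t by simp]
    simp only [List.length_cons]
    omega

lemma getD_mk_cases {β : Type} : ∀ (l : List (String × β)) (k : String) (dflt : β),
    (PySem.Dict.mk l).getD k dflt = dflt ∨ ∃ p ∈ l, (PySem.Dict.mk l).getD k dflt = p.2 := by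
  intro l
  induction l with
  | nil => intro k dflt; left; simp [PySem.Dict.getD_eq_get?_getD, PySem.Dict.get?]
  | cons p t ih =>
    intro k dflt
    obtain ⟨k', v⟩ := p
    rw [PySem.Dict.getD_eq_get?_getD, PySem.Dict.get?_mk_cons]
    by_cases he : k' == k
    · rw [if_pos he]
      exact Or.inr ⟨(k', v), List.mem_cons_self .., rfl⟩
    · rw [if_neg he, ← PySem.Dict.getD_eq_get?_getD]
      rcases ih k dflt with h | ⟨p, hp, h⟩
      · exact Or.inl h
      · exact Or.inr ⟨p, List.mem_cons_of_mem _ hp, h⟩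

lemma pvNbrs_sub (graph : List (String × List (String × List String))) (u x : String)
    (h : x ∈ pvNbrs graph u) : x ∈ pvAllN graph := by
  have hnode : ∀ key : String,
      x ∈ (PySem.Dict.mk ((PySem.Dict.mk graph).getD u [])).getD key [] → x ∈ pvAllN graph := by
    intro key hk
    rcases getD_mk_cases graph u [] with hg | ⟨p, hp, hg⟩
    · rw [hg] at hk
      rcases getD_mk_cases ([] : List (String × List String)) key [] with h0 | ⟨q, hq, _⟩
      · rw [h0] at hk; simp at hk
      · simp at hq
    · rw [hg] at hk
      rcases getD_mk_cases p.2 key [] with h0 | ⟨q, hq, h0⟩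
      · rw [h0] at hk; simp at hk
      · rw [h0] at hk
        exact List.mem_flatMap.mpr ⟨p, hp, List.mem_flatMap.mpr ⟨q, hq, hk⟩⟩
  rw [pvNbrs] at h
  simp only [List.mem_append] at h
  rcases h with (h | h) | h
  · exact hnode _ h
  · exact hnode _ h
  · exact hnode _ h

lemma pvSim (node_id : String) (graph : List (String × List (String × List String))) (max_depth : Int) :
    ∀ (fuel : Nat) (frontier : List (String × Int)) (dist : PySem.Dict String Int)
      (done : List (String × Int)),
    dist.items = done ++ frontier →
    dist.keys.Nodup →
    node_id ∈ dist.keys →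
    (∀ p ∈ done, ¬ pvCand node_id graph max_depth p) →
    (∀ p ∈ dist.items, (p.1 = node_id ↔ p.2 = 0) ∧ 0 ≤ p.2) →
    frontier.length + ((pvAllN graph).filter (fun x => decide (x ∉ dist.keys))).length + 1 ≤ fuel →
    aLoop node_id graph max_depth fuel frontier dist.keys
      = bScan node_id graph max_depth
          (bLoop graph max_depth fuel (frontier.map Prod.fst) dist).items := by
  intro fuel
  induction fuel with
  | zero => intro frontier dist done _ _ _ _ _ hfuel; omega
  | succ f ih =>
    intro frontier dist done hitems hnd hmem hdone hdep hfuel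
    match frontier with
    | [] =>
      rw [show ([] : List (String × Int)).map Prod.fst = [] from rfl, aLoop, bLoop]
      rw [hitems, List.append_nil] at *
      exact (bScan_eq_zero node_id graph max_depth done hdone).symm
    | (current, depth) :: rest =>
      have hmemp : (current, depth) ∈ dist.items := by rw [hitems]; simp
      have hgetD : dist.getD current 0 = depth := PySem.Dict.getD_of_mem_items _ hmemp hnd 0
      have hdep0 := hdep _ hmemp
      simp only at hdep0
      rw [List.map_cons, aLoop, bLoop]
      simp only [hgetD]
      by_cases hmd : max_depth ≤ depth
      · rw [if_pos hmd, if_neg (by omega)]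
        refine ih rest dist (done ++ [(current, depth)]) (by rw [hitems]; simp) hnd hmem
          ?_ hdep (by simp at hfuel ⊢; omega)
        intro p hp
        rcases List.mem_append.mp hp with h | h
        · exact hdone p h
        · simp only [List.mem_singleton] at h
          subst h
          exact fun hc => absurd hc.2.1 (by omega)
      · rw [if_neg hmd, if_pos (by omega)]
        by_cases hex : 0 < depth ∧ node_id ∈ pvNbrs graph current
        · rw [aInner_exit node_id graph max_depth f depth hex.1 _ _ _ hex.2]
          obtain ⟨ext, hext⟩ := bLoop_items_prefix graph max_depth f
            (rest.map Prod.fst ++ ((pvNbrs graph current).foldl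
              (fun (p : PySem.Dict String Int × List String) nb =>
                if p.1.contains nb then p else (p.1.insert nb (depth + 1), p.2 ++ [nb]))
              (dist, [])).2)
            ((pvNbrs graph current).foldl
              (fun (p : PySem.Dict String Int × List String) nb =>
                if p.1.contains nb then p else (p.1.insert nb (depth + 1), p.2 ++ [nb]))
              (dist, [])).1
          have he1 := (bFold_eq depth (pvNbrs graph current) dist [] hnd).2
          rw [hext, he1, hitems]
          have hc : pvCand node_id graph max_depth (current, depth) := by
            refine ⟨fun he => by have := hdep0.1.mp he; omega, by omega, hex.2⟩
          simp only [List.append_assoc, List.cons_append]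
          exact (bScan_append node_id graph max_depth done _ current depth hdone hc).symm
        · -- no early exit: lockstep via the fold/inner characterisations
          have hnoex : ∀ nb ∈ pvNbrs graph current, ¬ (nb = node_id ∧ 0 < depth) :=
            fun nb hnb hp => hex ⟨hp.2, hp.1 ▸ hnb⟩
          rw [aInner_no_exit node_id graph max_depth f depth _ rest dist.keys hnoex]
          obtain ⟨hf2, hf1⟩ := bFold_eq depth (pvNbrs graph current) dist [] hnd
          set F := pvFresh dist.keys (pvNbrs graph current) with hF
          set s := (pvNbrs graph current).foldl
            (fun (p : PySem.Dict String Int × List String) nb =>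
              if p.1.contains nb then p else (p.1.insert nb (depth + 1), p.2 ++ [nb]))
            (dist, ([] : List String)) with hs
          have hkeys' : s.1.keys = dist.keys ++ F := by
            show s.1.items.map Prod.fst = _
            rw [hf1]
            simp [PySem.Dict.keys, Function.comp_def]
          have hFmem : ∀ x ∈ F, x ∉ dist.keys ∧ x ∈ pvNbrs graph current :=
            fun x hx => pvFresh_mem _ _ x hx
          have hkey : aLoop node_id graph max_depth f
              (rest ++ F.map (fun x => (x, depth + 1))) (dist.keys ++ F)
              = aLoop node_id graph max_depth f
              (rest ++ F.map (fun x => (x, depth + 1))) s.1.keys := by rw [hkeys']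
          rw [hkey]
          have hq : rest.map Prod.fst ++ s.2 = (rest ++ F.map (fun x => (x, depth + 1))).map Prod.fst := by
            rw [hf2]
            simp [Function.comp_def]
          rw [show bLoop graph max_depth f (rest.map Prod.fst ++ s.2) s.1
              = bLoop graph max_depth f ((rest ++ F.map (fun x => (x, depth + 1))).map Prod.fst) s.1
            from by rw [hq]]
          refine ih (rest ++ F.map (fun x => (x, depth + 1))) s.1 (done ++ [(current, depth)])
            ?_ ?_ ?_ ?_ ?_ ?_
          · rw [hf1, hitems]; simp
          · rw [hkeys']
            refine List.Nodup.append hnd (pvFresh_nodup ..) ?_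
            intro x hx hx'
            exact (hFmem x hx').1 hx
          · rw [hkeys']; exact List.mem_append_left _ hmem
          · intro p hp
            rcases List.mem_append.mp hp with h | h
            · exact hdone p h
            · simp only [List.mem_singleton] at h
              subst h
              intro hc
              exact hex ⟨by
                have := hdep0.1
                rcases hc with ⟨h1, _, h3⟩
                have : ¬ depth = 0 := fun h0 => h1 (hdep0.1.mpr h0)
                omega, hc.2.2⟩
          · intro p hp
            rw [hf1] at hp
            rcases List.mem_append.mp hp with h | h
            · exact hdep p h
            · obtain ⟨x, hx, rfl⟩ := List.mem_map.mp h
              have hxk := (hFmem x hx).1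
              refine ⟨⟨fun he => absurd ((show x = node_id from he) ▸ hmem) hxk, by simp; omega⟩,
                by simp; omega⟩
          · have hcount := pvCount (pvAllN graph) F dist.keys (pvFresh_nodup ..)
              (fun x hx => ⟨pvNbrs_sub graph current x (hFmem x hx).2, (hFmem x hx).1⟩)
            rw [hkeys']
            simp only [List.length_append, List.length_map, List.length_cons] at hfuel ⊢
            omega

-- ===== VERDICT (by name: the statement is the Claim_ definition above) =====
theorem recurrence_depth_py_spec : Claim_equal_recurrence_depth_py := by
  intro node_id graph max_depth _
  unfold Spec_recurrence_depth_py recurrence_depth_py recurrence_depth_py_alt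
  by_cases h : (PySem.Dict.mk graph).contains node_id
  · simp only [h, not_true_eq_false, if_false]
    have hitems : (PySem.Dict.empty.insert node_id (0 : Int)).items
        = [] ++ [(node_id, (0 : Int))] := rfl
    have hkeys : (PySem.Dict.empty.insert node_id (0 : Int)).keys = [node_id] := rfl
    have hset : PySem.Set.add PySem.Set.empty node_id
        = (PySem.Dict.empty.insert node_id (0 : Int)).keys := rfl
    have hfuel : ([(node_id, (0 : Int))] : List (String × Int)).length
        + ((pvAllN graph).filter
            (fun x => decide (x ∉ (PySem.Dict.empty.insert node_id (0 : Int)).keys))).length + 1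
        ≤ pvFuel graph := by
      have := List.length_filter_le
        (fun x => decide (x ∉ (PySem.Dict.empty.insert node_id (0 : Int)).keys)) (pvAllN graph)
      simp only [List.length_singleton, pvFuel, pvAllN] at this ⊢
      omega
    have := pvSim node_id graph max_depth (pvFuel graph) [(node_id, 0)]
      (PySem.Dict.empty.insert node_id 0) [] hitems (by rw [hkeys]; simp)
      (by rw [hkeys]; simp) (by simp)
      (by
        intro p hp
        rw [hitems] at hp
        simp only [List.nil_append, List.mem_singleton] at hp
        subst hp
        exact ⟨⟨fun _ => rfl, fun _ => rfl⟩, le_refl _⟩)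
      hfuel
    rw [hset]
    rw [this]
    rfl
  · simp [h]
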